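-- pv_equiv track=rewrite | github.com/ShaeOJ/Caps_Mining_Pack | stratum/stratum_server.py | swap32
-- ===== SOURCE A (Python) =====
-- def swap32(hex_str: str) -> str:
--     """Swap every 4 bytes (8 hex chars) in the string."""
--     return "".join(
--         hex_str[i + 6 : i + 8]
--         + hex_str[i + 4 : i + 6]
--         + hex_str[i + 2 : i + 4]
--         + hex_str[i : i + 2]
--         for i in range(0, len(hex_str), 8)
--     )
-- ===== SOURCE B (Python) =====
-- def swap32(hex_str: str) -> str:
--     """Swap every 4 bytes (8 hex chars) in the string."""
--     tokens = [hex_str[i:i + 2] for i in range(0, len(hex_str), 2)]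
--     out = []
--     for i in range(0, len(tokens), 4):
--         out.extend(reversed(tokens[i:i + 4]))
--     return "".join(out)
-- ===== Notes on version B (the rewrite author's own statement) =====
-- stated objective: alternative
-- what changed: B first tokenizes the string into 2-char byte tokens, then reverses fixed 4-token windows and joins, instead of concatenating four index-arithmetic slices per 8-char chunk.
import Mathlib
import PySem

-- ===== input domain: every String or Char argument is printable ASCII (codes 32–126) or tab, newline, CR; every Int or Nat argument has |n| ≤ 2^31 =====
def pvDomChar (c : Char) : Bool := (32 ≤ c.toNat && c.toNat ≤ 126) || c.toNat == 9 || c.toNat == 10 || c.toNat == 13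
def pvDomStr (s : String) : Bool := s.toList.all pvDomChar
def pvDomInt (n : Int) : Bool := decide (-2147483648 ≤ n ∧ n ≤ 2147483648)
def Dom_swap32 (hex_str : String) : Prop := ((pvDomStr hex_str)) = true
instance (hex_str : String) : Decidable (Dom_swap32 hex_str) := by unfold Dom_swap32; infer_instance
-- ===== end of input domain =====

-- B tokenizes the string into 2-char byte tokens and reverses fixed 4-token windows,
-- instead of concatenating four index-arithmetic slices per 8-char chunk (objective: alternative decomposition).

-- ===== PORT A =====
def swap32 (hex_str : String) : String :=
  String.ofList
    (((PySem.List.pyRange 0 (hex_str.toList.length : Int) 8).map (fun i =>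
        PySem.List.slice hex_str.toList (some (i+6)) (some (i+8)) ++
        PySem.List.slice hex_str.toList (some (i+4)) (some (i+6)) ++
        PySem.List.slice hex_str.toList (some (i+2)) (some (i+4)) ++
        PySem.List.slice hex_str.toList (some i) (some (i+2)))).flatten)

-- ===== PORT B =====
def swap32_alt (hex_str : String) : String :=
  let s := hex_str.toList
  let tokens := (PySem.List.pyRange 0 (s.length : Int) 2).map
      (fun i => PySem.List.slice s (some i) (some (i+2)))
  let out := (PySem.List.pyRange 0 (tokens.length : Int) 4).foldl
      (fun acc i => acc ++ (PySem.List.slice tokens (some i) (some (i+4))).reverse) []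
  String.ofList out.flatten

-- ===== PRECONDITION & SPEC =====
def Spec_swap32 (hex_str : String) (out : String) : Prop := out = swap32_alt hex_str
instance (hex_str : String) (out : String) : Decidable (Spec_swap32 hex_str out) := by unfold Spec_swap32; infer_instance

-- ===== CLAIM (what is proved, stated in full; the proofs are below) =====
def Claim_equal_swap32 : Prop := ∀ (hex_str : String), Dom_swap32 hex_str → Spec_swap32 hex_str (swap32 hex_str)

-- ===== LEMMAS AND PROOFS =====

-- A's body, named for the proofs
def pvA (s : List Char) : List Char :=
  ((PySem.List.pyRange 0 (s.length : Int) 8).map (fun i =>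
      PySem.List.slice s (some (i+6)) (some (i+8)) ++
      PySem.List.slice s (some (i+4)) (some (i+6)) ++
      PySem.List.slice s (some (i+2)) (some (i+4)) ++
      PySem.List.slice s (some i) (some (i+2)))).flatten

-- B's token list and window list, named for the proofs
def pvToks (s : List Char) : List (List Char) :=
  (PySem.List.pyRange 0 (s.length : Int) 2).map
    (fun i => PySem.List.slice s (some i) (some (i+2)))

def pvB (t : List (List Char)) : List (List Char) :=
  ((PySem.List.pyRange 0 (t.length : Int) 4).map
    (fun i => (PySem.List.slice t (some i) (some (i+4))).reverse)).flatten

-- the byte-swap of the first (at most) 8 characters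
def pvSwapHead (s : List Char) : List Char :=
  ((s.drop 6).take 2 ++ (s.drop 4).take 2 ++ (s.drop 2).take 2 ++ s.take 2)

lemma pvRange_nil (a b st : Int) (hst : 0 < st) (h : b ≤ a) :
    PySem.List.pyRange a b st = [] := by
  rw [PySem.List.pyRange_of_pos _ _ hst, if_neg (by omega), List.range_zero, List.map_nil]

lemma pvRange_cons (b st : Int) (hst : 0 < st) (hb : 0 < b) :
    PySem.List.pyRange 0 b st = 0 :: PySem.List.pyRange st b st := by
  rw [PySem.List.pyRange_of_pos _ _ hst, PySem.List.pyRange_of_pos _ _ hst]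
  have key : (b - 0 + st - 1) / st = (b - 1) / st + 1 := by
    have h1 : b - 0 + st - 1 = (b - 1) + 1 * st := by ring
    rw [h1, Int.add_mul_ediv_right _ _ hst.ne']
  have hnn : 0 ≤ (b - 1) / st := Int.ediv_nonneg (by omega) hst.le
  rw [if_pos hb, key]
  have hcnt : ((b - 1) / st + 1).toNat = ((b - 1) / st).toNat + 1 := by omega
  rw [hcnt, List.range_succ_eq_map, List.map_cons, List.map_map]
  by_cases h : st < b
  · rw [if_pos h]
    have harg : b - st + st - 1 = b - 1 := by ring
    rw [harg]
    congr 1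
    · norm_num
    · apply List.map_congr_left
      intro k _
      simp only [Function.comp_apply, Nat.succ_eq_add_one]
      push_cast
      ring
  · rw [if_neg h]
    have h0 : (b - 1) / st = 0 := Int.ediv_eq_zero_of_lt (by omega) (by omega)
    rw [h0]
    norm_num

lemma pvRange_shift_map {α : Type} (b st : Int) (hst : 0 < st) (f : Int → α) :
    (PySem.List.pyRange st b st).map f
      = (PySem.List.pyRange 0 (b - st) st).map (fun i => f (i + st)) := by
  rw [PySem.List.pyRange_of_pos _ _ hst, PySem.List.pyRange_of_pos _ _ hst,
    List.map_map, List.map_map]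
  have hcnt : (if st < b then ((b - st + st - 1) / st).toNat else 0)
      = (if 0 < b - st then ((b - st - 0 + st - 1) / st).toNat else 0) := by
    by_cases h : st < b
    · rw [if_pos h, if_pos (by omega)]
      have harg : b - st - 0 + st - 1 = b - st + st - 1 := by ring
      rw [harg]
    · rw [if_neg h, if_neg (by omega)]
  rw [hcnt]
  congr 1
  funext k
  simp only [Function.comp_apply]
  congr 1
  ring

lemma pvA_nil : pvA [] = [] := by
  unfold pvA
  rw [show (([] : List Char).length : Int) = 0 by simp, pvRange_nil 0 0 8 (by norm_num) le_rfl]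
  simp

lemma pvToks_nil : pvToks [] = [] := by
  unfold pvToks
  rw [show (([] : List Char).length : Int) = 0 by simp, pvRange_nil 0 0 2 (by norm_num) le_rfl]
  simp

lemma pvB_nil : pvB [] = [] := by
  unfold pvB
  rw [show (([] : List (List Char)).length : Int) = 0 by simp,
    pvRange_nil 0 0 4 (by norm_num) le_rfl]
  simp

lemma pvChunkA_eq (s : List Char) (i : Int) (hi : 0 ≤ i) :
    PySem.List.slice s (some (i+6)) (some (i+8)) ++
    PySem.List.slice s (some (i+4)) (some (i+6)) ++
    PySem.List.slice s (some (i+2)) (some (i+4)) ++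
    PySem.List.slice s (some i) (some (i+2)) = pvSwapHead (s.drop i.toNat) := by
  rw [PySem.List.slice_toNat s (by omega) (by omega),
      PySem.List.slice_toNat s (by omega) (by omega),
      PySem.List.slice_toNat s (by omega) (by omega),
      PySem.List.slice_toNat s (by omega) (by omega)]
  unfold pvSwapHead
  simp only [List.drop_drop, List.take_drop]
  rw [show (i+2).toNat = i.toNat + 2 by omega, show (i+4).toNat = i.toNat + 4 by omega,
      show (i+6).toNat = i.toNat + 6 by omega, show (i+8).toNat = i.toNat + 8 by omega]
  rw [show i.toNat + 8 - (i.toNat + 6) = 2 by omega, show i.toNat + 6 - (i.toNat + 4) = 2 by omega,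
      show i.toNat + 4 - (i.toNat + 2) = 2 by omega, show i.toNat + 2 - i.toNat = 2 by omega]

lemma pvTok_eq (s : List Char) (i : Int) (hi : 0 ≤ i) :
    PySem.List.slice s (some i) (some (i+2)) = (s.drop i.toNat).take 2 := by
  rw [PySem.List.slice_toNat s hi (by omega)]
  rw [show (i+2).toNat - i.toNat = 2 by omega]

lemma pvWin_eq (t : List (List Char)) (i : Int) (hi : 0 ≤ i) :
    PySem.List.slice t (some i) (some (i+4)) = (t.drop i.toNat).take 4 := by
  rw [PySem.List.slice_toNat t hi (by omega)]
  rw [show (i+4).toNat - i.toNat = 4 by omega]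

lemma pvA_peel (s : List Char) (h : s ≠ []) :
    pvA s = pvSwapHead s ++ pvA (s.drop 8) := by
  have hn : 0 < (s.length : Int) := by
    have hne : s.length ≠ 0 := fun hh => h (List.eq_nil_of_length_eq_zero hh)
    exact_mod_cast Nat.pos_of_ne_zero hne
  unfold pvA
  rw [pvRange_cons _ 8 (by norm_num) hn, List.map_cons, List.flatten_cons,
    pvRange_shift_map _ 8 (by norm_num)]
  congr 1
  · have := pvChunkA_eq s 0 le_rfl
    simpa using this
  · by_cases h8 : 8 ≤ s.length
    · have hlen : ((s.drop 8).length : Int) = (s.length : Int) - 8 := by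
        simp [List.length_drop]; omega
      rw [hlen]
      congr 1
      apply List.map_congr_left
      intro i hi
      have hi0 : 0 ≤ i := ((PySem.List.mem_pyRange_iff_of_pos (by norm_num) i).mp hi).1
      rw [pvChunkA_eq s (i+8) (by omega), pvChunkA_eq (s.drop 8) i hi0, List.drop_drop,
        show 8 + i.toNat = (i+8).toNat by omega]
    · have hd : s.drop 8 = [] := List.drop_eq_nil_of_le (by omega)
      rw [pvRange_nil 0 ((s.length : Int) - 8) 8 (by norm_num) (by omega), hd,
        pvRange_nil 0 (((([] : List Char)).length : Int)) 8 (by norm_num) (by simp)]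
      simp


lemma pvToks_peel (s : List Char) (h : s ≠ []) :
    pvToks s = s.take 2 :: pvToks (s.drop 2) := by
  have hn : 0 < (s.length : Int) := by
    have hne : s.length ≠ 0 := fun hh => h (List.eq_nil_of_length_eq_zero hh)
    exact_mod_cast Nat.pos_of_ne_zero hne
  unfold pvToks
  rw [pvRange_cons _ 2 (by norm_num) hn, List.map_cons,
    pvRange_shift_map _ 2 (by norm_num)]
  congr 1
  · have := pvTok_eq s 0 le_rfl
    simpa using this
  · by_cases h2 : 2 ≤ s.length
    · have hlen : ((s.drop 2).length : Int) = (s.length : Int) - 2 := by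
        simp [List.length_drop]; omega
      rw [hlen]
      apply List.map_congr_left
      intro i hi
      have hi0 : 0 ≤ i := ((PySem.List.mem_pyRange_iff_of_pos (by norm_num) i).mp hi).1
      rw [pvTok_eq s (i+2) (by omega), pvTok_eq (s.drop 2) i hi0, List.drop_drop,
        show 2 + i.toNat = (i+2).toNat by omega]
    · have hd : s.drop 2 = [] := List.drop_eq_nil_of_le (by omega)
      rw [pvRange_nil 0 ((s.length : Int) - 2) 2 (by norm_num) (by omega), hd,
        pvRange_nil 0 (((([] : List Char)).length : Int)) 2 (by norm_num) (by simp)]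
      simp


lemma pvB_peel (t : List (List Char)) (h : t ≠ []) :
    pvB t = (t.take 4).reverse ++ pvB (t.drop 4) := by
  have hn : 0 < (t.length : Int) := by
    have hne : t.length ≠ 0 := fun hh => h (List.eq_nil_of_length_eq_zero hh)
    exact_mod_cast Nat.pos_of_ne_zero hne
  unfold pvB
  rw [pvRange_cons _ 4 (by norm_num) hn, List.map_cons, List.flatten_cons,
    pvRange_shift_map _ 4 (by norm_num)]
  congr 1
  · have := pvWin_eq t 0 le_rfl
    simp at this
    simp [this]
  · by_cases h4 : 4 <= t.length
    · have hlen : ((t.drop 4).length : Int) = (t.length : Int) - 4 := by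
        simp [List.length_drop]; omega
      rw [hlen]
      congr 1
      apply List.map_congr_left
      intro i hi
      have hi0 : 0 <= i := ((PySem.List.mem_pyRange_iff_of_pos (by norm_num) i).mp hi).1
      rw [pvWin_eq t (i+4) (by omega), pvWin_eq (t.drop 4) i hi0, List.drop_drop,
        show 4 + i.toNat = (i+4).toNat by omega]
    · have hd : t.drop 4 = [] := List.drop_eq_nil_of_le (by omega)
      rw [pvRange_nil 0 ((t.length : Int) - 4) 4 (by norm_num) (by omega), hd,
        pvRange_nil 0 (((([] : List (List Char))).length : Int)) 4 (by norm_num) (by simp)]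
      simp


lemma pvToks_drop (k : Nat) (s : List Char) :
    (pvToks s).drop k = pvToks (s.drop (2*k)) := by
  induction k generalizing s with
  | zero => simp
  | succ k ih =>
    by_cases hs : s = []
    · subst hs
      simp [pvToks_nil]
    · rw [pvToks_peel s hs, List.drop_succ_cons, ih, List.drop_drop,
        show 2*(k+1) = 2 + 2*k by ring]


lemma pvHead_eq (s : List Char) :
    (((pvToks s).take 4).reverse).flatten = pvSwapHead s := by
  by_cases h0 : s = []
  · subst h0
    simp [pvToks_nil, pvSwapHead]
  rw [pvToks_peel s h0]
  by_cases h1 : s.drop 2 = []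
  · rw [h1, pvToks_nil]
    have d4 : s.drop 4 = [] := by
      have := h1
      rw [show (4:Nat) = 2 + 2 by rfl, <- List.drop_drop, this]
      rfl
    have d6 : s.drop 6 = [] := by
      rw [show (6:Nat) = 4 + 2 by rfl, <- List.drop_drop, d4]
      rfl
    simp [pvSwapHead, h1, d4, d6]
  rw [pvToks_peel _ h1]
  by_cases h2 : (s.drop 2).drop 2 = []
  · rw [h2, pvToks_nil]
    have d4 : s.drop 4 = [] := by rw [show (4:Nat) = 2 + 2 by rfl, <- List.drop_drop]; exact h2
    have d6 : s.drop 6 = [] := by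
      rw [show (6:Nat) = 4 + 2 by rfl, <- List.drop_drop, d4]
      rfl
    simp [pvSwapHead, d4, d6]
  rw [pvToks_peel _ h2]
  by_cases h3 : ((s.drop 2).drop 2).drop 2 = []
  · rw [h3, pvToks_nil]
    have d6 : s.drop 6 = [] := by
      rw [show (6:Nat) = 2 + (2 + 2) by rfl, <- List.drop_drop, <- List.drop_drop]
      exact h3
    simp [pvSwapHead, d6, List.drop_drop]
  rw [pvToks_peel _ h3]
  simp [pvSwapHead, List.drop_drop]


lemma pvMain (n : Nat) (s : List Char) (hn : s.length ≤ n) :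
    pvA s = (pvB (pvToks s)).flatten := by
  induction n generalizing s with
  | zero =>
    have : s = [] := List.eq_nil_of_length_eq_zero (by omega)
    subst this
    simp [pvA_nil, pvToks_nil, pvB_nil]
  | succ n ih =>
    by_cases hs : s = []
    · subst hs
      simp [pvA_nil, pvToks_nil, pvB_nil]
    · have ht : pvToks s ≠ [] := by rw [pvToks_peel s hs]; simp
      rw [pvA_peel s hs, pvB_peel _ ht, List.flatten_append, pvHead_eq,
        pvToks_drop 4 s, show (2*4 : Nat) = 8 by rfl]
      congr 1
      exact ih (s.drop 8) (by simp [List.length_drop]; omega)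


lemma pvFoldl_append {α β : Type} (l : List α) (g : α → List β) (acc : List β) :
    l.foldl (fun acc i => acc ++ g i) acc = acc ++ (l.map g).flatten := by
  induction l generalizing acc with
  | nil => simp
  | cons x xs ih => simp [ih, List.append_assoc]

-- ===== VERDICT (by name: the statement is the Claim_ definition above) =====
theorem swap32_spec : Claim_equal_swap32 := by
  intro hex_str _
  unfold Spec_swap32 swap32 swap32_alt
  congr 1
  rw [pvFoldl_append]
  simp only [List.nil_append]
  exact pvMain hex_str.toList.length hex_str.toList le_rfl
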